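-- pv_equiv track=rewrite | github.com/hoiho77/Algorithm | hoiho/grid/question1.py | solution
-- ===== SOURCE A (Python) =====
-- def solution(size, num, max, data):
--   #배열을 가장 큰 수부터 정렬
--   data_list = sorted(data, reverse=True)
--
--   answer, count = 0, 0
--   while True :
--     if count > num :
--       break
--
--     for i in range(max):
--       answer += data_list[0]
--       count += 1
--
--     answer += data_list[1]
--     count += 1
--
--   return answer
-- ===== SOURCE B (Python) =====
-- def solution(size, num, max, data):
--     # closed form: each pass of A's loop adds m*top + second and advances count by m+1
--     if data[0] >= data[1]:
--         top, second = data[0], data[1]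
--     else:
--         top, second = data[1], data[0]
--     for x in data[2:]:
--         if x > top:
--             top, second = x, top
--         elif x > second:
--             second = x
--     m = max if max > 0 else 0
--     k = 0 if num < 0 else num // (m + 1) + 1
--     return k * (m * top + second)
-- ===== Notes on version B (the rewrite author's own statement) =====
-- stated objective: faster
-- what changed: Replaces A's sort plus repeated-addition while-loop by a single linear scan for the two largest elements and a closed-form count k = num//(m+1)+1 of loop passes, returning k*(m*top+second) directly.
-- outside the precondition, e.g. on solution(2, -1, 7920, []): A returns 0, B raises IndexError
import Mathlib
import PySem

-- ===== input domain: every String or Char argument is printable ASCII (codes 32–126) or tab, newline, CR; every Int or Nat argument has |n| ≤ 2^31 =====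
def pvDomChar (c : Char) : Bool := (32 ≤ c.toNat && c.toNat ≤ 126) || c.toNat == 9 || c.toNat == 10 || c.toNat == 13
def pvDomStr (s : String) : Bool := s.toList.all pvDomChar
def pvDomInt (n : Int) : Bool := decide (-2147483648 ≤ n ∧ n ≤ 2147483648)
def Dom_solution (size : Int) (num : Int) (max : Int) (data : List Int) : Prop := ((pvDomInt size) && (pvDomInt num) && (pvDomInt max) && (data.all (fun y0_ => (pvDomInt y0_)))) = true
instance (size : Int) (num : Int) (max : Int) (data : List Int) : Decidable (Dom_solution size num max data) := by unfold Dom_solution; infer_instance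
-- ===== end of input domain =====

-- B replaces A's sort + repeated-addition while-loop by a linear two-largest scan and a
-- closed-form count of loop passes (faster: asymptotic in num and n).

-- ===== PORT A =====
-- termination helper for the while-loop: the inner for-loop advances count by the range length
theorem pv_foldl_snd (g0 : Int) (l : List Int) (st : Int × Int) :
    (l.foldl (fun (s : Int × Int) (_ : Int) => (s.1 + g0, s.2 + 1)) st).2 = st.2 + l.length := by
  induction l generalizing st with
  | nil => simp
  | cons x t ih => simp [List.foldl_cons, ih]; omega

-- while True: if count > num: break; for i in range(max): answer += dl[0]; count += 1; answer += dl[1]; count += 1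
def solutionLoop (num : Int) (dl : List Int) (mx : Int) (answer count : Int) : Int :=
  if count > num then answer
  else
    let p := (PySem.List.pyRange 0 mx 1).foldl
      (fun (s : Int × Int) (_ : Int) => (s.1 + (PySem.List.pyGet? dl 0).getD 0, s.2 + 1)) (answer, count)
    solutionLoop num dl mx (p.1 + (PySem.List.pyGet? dl 1).getD 0) (p.2 + 1)
termination_by (num + 1 - count).toNat
decreasing_by
  have h := pv_foldl_snd ((PySem.List.pyGet? dl 0).getD 0) (PySem.List.pyRange 0 mx 1) (answer, count)
  simp at h
  omega

def solution (size : Int) (num : Int) (max : Int) (data : List Int) : Int :=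
  solutionLoop num (PySem.List.sorted data (fun x => x) true) max 0 0

-- ===== PORT B =====
def solutionAltStep (st : Int × Int) (x : Int) : Int × Int :=
  if x > st.1 then (x, st.1) else if x > st.2 then (st.1, x) else st

def solution_alt (size : Int) (num : Int) (max : Int) (data : List Int) : Int :=
  let d0 := (PySem.List.pyGet? data 0).getD 0
  let d1 := (PySem.List.pyGet? data 1).getD 0
  let init := if d0 ≥ d1 then (d0, d1) else (d1, d0)
  let p := (PySem.List.slice data (some 2) none).foldl solutionAltStep init
  let m := if max > 0 then max else 0
  let k := if num < 0 then 0 else PySem.Int.floordiv num (m + 1) + 1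
  k * (m * p.1 + p.2)

-- ===== PRECONDITION & SPEC =====
-- Pre_ excludes lists of length < 2: there A raises IndexError on data_list[1]/data_list[0] whenever num >= 0, and when num < 0 it returns 0 only because it breaks before ever indexing, while B always reads the top two elements and raises
def Pre_solution (size : Int) (num : Int) (max : Int) (data : List Int) : Prop := 2 ≤ data.length
instance (size : Int) (num : Int) (max : Int) (data : List Int) : Decidable (Pre_solution size num max data) := by unfold Pre_solution; infer_instance
def pvWitness_solution : Int × Int × Int × List Int := (3, 10, 2, [5, 3, 1])

def Spec_solution (size : Int) (num : Int) (max : Int) (data : List Int) (out : Int) : Prop := out = solution_alt size num max data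
instance (size : Int) (num : Int) (max : Int) (data : List Int) (out : Int) : Decidable (Spec_solution size num max data out) := by unfold Spec_solution; infer_instance

-- ===== CLAIM =====
def Claim_equal_solution : Prop := ∀ (size : Int) (num : Int) (max : Int) (data : List Int), Dom_solution size num max data → Pre_solution size num max data → Spec_solution size num max data (solution size num max data)

-- ===== LEMMAS AND PROOFS =====

theorem pv_foldl_fst (g0 : Int) (l : List Int) (st : Int × Int) :
    (l.foldl (fun (s : Int × Int) (_ : Int) => (s.1 + g0, s.2 + 1)) st).1 = st.1 + l.length * g0 := by
  induction l generalizing st with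
  | nil => simp
  | cons x t ih => simp [List.foldl_cons, ih]; ring

-- closed form for A's while-loop
theorem solutionLoop_closed : ∀ (n : Nat) (num : Int) (dl : List Int) (mx : Int) (answer count : Int),
    (num + 1 - count).toNat ≤ n →
    solutionLoop num dl mx answer count =
      answer + (if count > num then 0 else ((num - count) / ((mx.toNat : Int) + 1) + 1)) *
        ((mx.toNat : Int) * (PySem.List.pyGet? dl 0).getD 0 + (PySem.List.pyGet? dl 1).getD 0) := by
  intro n
  induction n with
  | zero =>
    intro num dl mx a c hn
    have hc : c > num := by omega
    rw [solutionLoop]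
    simp [hc]
  | succ n ih =>
    intro num dl mx a c hn
    by_cases hc : c > num
    · rw [solutionLoop]; simp [hc]
    · rw [solutionLoop]
      simp only [hc, if_false]
      set g0 := (PySem.List.pyGet? dl 0).getD 0 with hg0
      set g1 := (PySem.List.pyGet? dl 1).getD 0 with hg1
      have hlen : ((PySem.List.pyRange 0 mx 1).length : Int) = (mx.toNat : Int) := by
        rw [PySem.List.length_pyRange_one]; simp
      set L : Int := (mx.toNat : Int) with hL
      have hL0 : 0 ≤ L := by simp [hL]
      have hfst := pv_foldl_fst g0 (PySem.List.pyRange 0 mx 1) (a, c)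
      have hsnd := pv_foldl_snd g0 (PySem.List.pyRange 0 mx 1) (a, c)
      rw [hfst, hsnd]
      simp only [hlen]
      rw [ih num dl mx (a + L * g0 + g1) (c + L + 1) (by omega)]
      by_cases hc2 : c + L + 1 > num
      · have hz : (num - c) / (L + 1) = 0 :=
          Int.ediv_eq_zero_of_lt (by omega) (by omega)
        simp [hc2, hz]; ring
      · have h1 : (num - c) / (L + 1) = (num - (c + L + 1)) / (L + 1) + 1 := by
          have h2 := Int.add_mul_ediv_right (num - (c + L + 1)) 1 (show L + 1 ≠ 0 by omega)
          have h3 : num - (c + L + 1) + 1 * (L + 1) = num - c := by ring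
          rw [h3] at h2
          omega
        simp only [hc2, if_false]
        rw [h1]; ring

-- invariant of B's two-largest fold: the kept pair dominates the discarded elements
theorem solutionAlt_fold_inv : ∀ (xs : List Int) (t s : Int), s ≤ t →
    s ≤ (xs.foldl solutionAltStep (t, s)).2 ∧
    (xs.foldl solutionAltStep (t, s)).2 ≤ (xs.foldl solutionAltStep (t, s)).1 ∧
    ∃ ds : List Int, (t :: s :: xs).Perm ((xs.foldl solutionAltStep (t, s)).1 :: (xs.foldl solutionAltStep (t, s)).2 :: ds) ∧
      ∀ d ∈ ds, d ≤ (xs.foldl solutionAltStep (t, s)).2 := by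
  intro xs
  induction xs with
  | nil =>
    intro t s hst
    exact ⟨le_refl s, hst, [], List.Perm.refl _, by simp⟩
  | cons x xs ih =>
    intro t s hst
    simp only [List.foldl_cons]
    by_cases h1 : x > t
    · have hstep : solutionAltStep (t, s) x = (x, t) := by simp [solutionAltStep, h1]
      rw [hstep]
      obtain ⟨m1, m2, ds, hperm, hds⟩ := ih x t (le_of_lt h1)
      refine ⟨le_trans hst m1, m2, s :: ds, ?_, ?_⟩
      · rw [List.perm_iff_count] at hperm ⊢
        intro a; have := hperm a
        simp [List.count_cons] at this ⊢; omega
      · intro d hd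
        rcases List.mem_cons.mp hd with h | h
        · subst h; exact le_trans hst m1
        · exact hds d h
    · by_cases h2 : x > s
      · have hstep : solutionAltStep (t, s) x = (t, x) := by simp [solutionAltStep, h1, h2]
        rw [hstep]
        obtain ⟨m1, m2, ds, hperm, hds⟩ := ih t x (by omega)
        refine ⟨by omega, m2, s :: ds, ?_, ?_⟩
        · rw [List.perm_iff_count] at hperm ⊢
          intro a; have := hperm a
          simp [List.count_cons] at this ⊢; omega
        · intro d hd
          rcases List.mem_cons.mp hd with h | h
          · subst h; omega
          · exact hds d h
      · have hstep : solutionAltStep (t, s) x = (t, s) := by simp [solutionAltStep, h1, h2]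
        rw [hstep]
        obtain ⟨m1, m2, ds, hperm, hds⟩ := ih t s hst
        refine ⟨m1, m2, x :: ds, ?_, ?_⟩
        · rw [List.perm_iff_count] at hperm ⊢
          intro a; have := hperm a
          simp [List.count_cons] at this ⊢; omega
        · intro d hd
          rcases List.mem_cons.mp hd with h | h
          · subst h; omega
          · exact hds d h

-- the head two of sorted-descending data are exactly B's fold result
theorem sorted_desc_head2 (d0 d1 : Int) (rest : List Int) :
    ∃ tl : List Int,
      PySem.List.sorted (d0 :: d1 :: rest) (fun x => x) true =
        (rest.foldl solutionAltStep (if d0 ≥ d1 then (d0, d1) else (d1, d0))).1 ::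
        (rest.foldl solutionAltStep (if d0 ≥ d1 then (d0, d1) else (d1, d0))).2 :: tl := by
  set init := if d0 ≥ d1 then (d0, d1) else (d1, d0) with hinit
  have hinit2 : init.2 ≤ init.1 := by
    rw [hinit]; split_ifs with h <;> simp <;> omega
  obtain ⟨m1, m2, ds, hperm, hds⟩ := solutionAlt_fold_inv rest init.1 init.2 hinit2
  simp only [Prod.mk.eta] at m1 m2 hperm hds
  set r := rest.foldl solutionAltStep init with hr
  refine ⟨PySem.List.sorted ds (fun x => x) true, ?_⟩
  set sds := PySem.List.sorted ds (fun x => x) true with hsds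
  -- the candidate r.1 :: r.2 :: sds is a descending permutation of the data
  have hsds_perm : sds.Perm ds := PySem.List.sorted_perm ds (fun x => x) true
  have hcand_perm : (r.1 :: r.2 :: sds).Perm (d0 :: d1 :: rest) := by
    have p1 : (r.1 :: r.2 :: sds).Perm (r.1 :: r.2 :: ds) :=
      List.Perm.cons _ (List.Perm.cons _ hsds_perm)
    have p2 : (init.1 :: init.2 :: rest).Perm (d0 :: d1 :: rest) := by
      rw [List.perm_iff_count]; intro a
      rw [hinit]; split_ifs <;> simp [List.count_cons] <;> omega
    exact p1.trans (hperm.symm.trans p2)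
  have hsorted_perm : (PySem.List.sorted (d0 :: d1 :: rest) (fun x => x) true).Perm (d0 :: d1 :: rest) :=
    PySem.List.sorted_perm _ _ _
  have hdesc_cand : (r.1 :: r.2 :: sds).Pairwise (fun a b => b ≤ a) := by
    have hsds_pw : sds.Pairwise (fun a b => b ≤ a) := by
      have := PySem.List.sorted_pairwise_rev ds (fun x => x)
      simpa using this
    have hmem : ∀ y ∈ sds, y ≤ r.2 := by
      intro y hy
      exact hds y ((PySem.List.mem_sorted ds (fun x => x) true y).mp hy)
    refine List.Pairwise.cons ?_ (List.Pairwise.cons hmem hsds_pw)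
    intro y hy
    rcases List.mem_cons.mp hy with h | h
    · subst h; exact m2
    · exact le_trans (hmem y h) m2
  have hdesc_sorted : (PySem.List.sorted (d0 :: d1 :: rest) (fun x => x) true).Pairwise (fun a b => b ≤ a) := by
    have := PySem.List.sorted_pairwise_rev (d0 :: d1 :: rest) (fun x => x)
    simpa using this
  -- uniqueness of the descending arrangement, via the injective key (-·)
  have hkey : Function.Injective (fun x : Int => -x) := fun a b h => by simpa using h
  refine PySem.List.eq_of_perm_of_pairwise_le_of_injective (fun x : Int => -x) hkey
    (hsorted_perm.trans hcand_perm.symm) ?_ ?_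
  · exact hdesc_sorted.imp (by intro a b h; simpa using h)
  · exact hdesc_cand.imp (by intro a b h; simpa using h)

-- ===== VERDICT (by name: the statement is the Claim_ definition above) =====
theorem solution_spec : Claim_equal_solution := by
  intro size num mx data hdom hpre
  unfold Spec_solution
  match data, hpre with
  | d0 :: d1 :: rest, _ =>
    obtain ⟨tl, hsorted⟩ := sorted_desc_head2 d0 d1 rest
    set init := if d0 ≥ d1 then (d0, d1) else (d1, d0) with hinit
    set r := rest.foldl solutionAltStep init with hr
    -- A's side
    have hA : solution size num mx (d0 :: d1 :: rest) =
        (if (0 : Int) > num then 0 else (num / ((mx.toNat : Int) + 1) + 1)) *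
          ((mx.toNat : Int) * r.1 + r.2) := by
      unfold solution
      rw [solutionLoop_closed (num + 1 - 0).toNat num _ mx 0 0 (le_refl _)]
      rw [hsorted]
      have hpos : (0:Int) ≤ (tl.length:Int) + 1 := by positivity
      simp [PySem.List.pyGet?, PySem.List.pyIdx?, hpos]
    -- B's side
    have hslice : PySem.List.slice (d0 :: d1 :: rest) (some 2) none = rest := by
      have := PySem.List.slice_from_natCast (d0 :: d1 :: rest) 2
      simpa using this
    have hB : solution_alt size num mx (d0 :: d1 :: rest) =
        (if num < 0 then 0 else PySem.Int.floordiv num ((if mx > 0 then mx else 0) + 1) + 1) *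
          ((if mx > 0 then mx else 0) * r.1 + r.2) := by
      unfold solution_alt
      rw [hslice]
      simp only [PySem.List.pyGet?_zero_cons, Option.getD_some]
      have h1 : PySem.List.pyGet? (d0 :: d1 :: rest) 1 = some d1 := by
        simp [PySem.List.pyGet?, PySem.List.pyIdx?]
      rw [h1]
      rfl
    rw [hA, hB]
    have hm : (if mx > 0 then mx else 0) = (mx.toNat : Int) := by
      split_ifs <;> omega
    rw [hm]
    by_cases hneg : num < 0
    · simp [hneg]
    · have h01 : ¬ ((0 : Int) > num) := by omega
      rw [PySem.Int.floordiv_eq_ediv_of_pos (by omega : (0 : Int) < (mx.toNat : Int) + 1)]
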